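-- pv_equiv track=rewrite | github.com/JianJX/algorithms | algorithm/test.py | count_subarray_sum
-- ===== SOURCE A (Python) =====
-- def count_subarray_sum(arr, k, s):
--     count = 0
--     for i in range(len(arr)):
--         for j in range(k):
--             if (j + i) < len(arr):
--                 sub_arr = arr[i:i + j + 1]
--                 if sum(sub_arr) == s:
--                     count += 1
--     return count
-- ===== SOURCE B (Python) =====
-- def count_subarray_sum(arr, k, s):
--     n = len(arr)
--     pref = [0]
--     running = 0
--     for x in arr:
--         running += x
--         pref.append(running)
--     count = 0
--     for i in range(n):
--         hi = min(n, i + k)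
--         for j in range(i + 1, hi + 1):
--             if pref[j] - pref[i] == s:
--                 count += 1
--     return count
-- ===== Notes on version B (the rewrite author's own statement) =====
-- stated objective: faster
-- what changed: B builds a prefix-sum array once and tests each candidate subarray with one O(1) subtraction over explicit end-index bounds, instead of A's re-slicing and re-summing every subarray inside the nested loops.
import Mathlib
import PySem

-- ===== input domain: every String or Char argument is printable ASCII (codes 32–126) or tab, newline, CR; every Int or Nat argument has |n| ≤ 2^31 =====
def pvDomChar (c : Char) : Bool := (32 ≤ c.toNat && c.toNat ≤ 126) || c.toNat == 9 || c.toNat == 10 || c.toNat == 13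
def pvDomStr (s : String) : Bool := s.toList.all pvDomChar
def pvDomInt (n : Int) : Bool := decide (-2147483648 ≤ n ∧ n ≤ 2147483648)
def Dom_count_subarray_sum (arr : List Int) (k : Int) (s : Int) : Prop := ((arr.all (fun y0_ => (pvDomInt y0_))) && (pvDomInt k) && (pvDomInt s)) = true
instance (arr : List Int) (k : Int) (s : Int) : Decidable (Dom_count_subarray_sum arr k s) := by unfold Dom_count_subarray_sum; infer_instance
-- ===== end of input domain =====

-- B replaces A's per-subarray slice-and-sum with a prefix-sum array, so each
-- candidate subarray is tested in O(1): O(n*k) instead of O(n*k^2).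

-- ===== PORT A =====
-- literal transliteration of A's nested loops with slicing and sum
def count_subarray_sum (arr : List Int) (k : Int) (s : Int) : Int :=
  (PySem.List.pyRange 0 (arr.length : Int) 1).foldl (fun count i =>
    (PySem.List.pyRange 0 k 1).foldl (fun count j =>
      if j + i < (arr.length : Int) then
        if (PySem.List.slice arr (some i) (some (i + j + 1))).sum = s then count + 1
        else count
      else count) count) 0

-- ===== PORT B =====
-- transliteration of Source B: build the prefix-sum list once, then loop over
-- start index i and end index j with O(1) membership test.
-- pref[j] / pref[i] are always in range here (1 ≤ j ≤ n, 0 ≤ i < n), so the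
-- pyGetD default 0 is never used.
def count_subarray_sum_alt (arr : List Int) (k : Int) (s : Int) : Int :=
  let n : Int := arr.length
  let st := arr.foldl (fun (st : List Int × Int) x => (st.1 ++ [st.2 + x], st.2 + x)) ([0], 0)
  let pref := st.1
  (PySem.List.pyRange 0 n 1).foldl (fun count i =>
    let hi := min n (i + k)
    (PySem.List.pyRange (i + 1) (hi + 1) 1).foldl (fun count j =>
      if PySem.List.pyGetD pref j 0 - PySem.List.pyGetD pref i 0 = s then count + 1
      else count) count) 0

-- ===== PRECONDITION & SPEC =====
def Spec_count_subarray_sum (arr : List Int) (k : Int) (s : Int) (out : Int) : Prop := out = count_subarray_sum_alt arr k s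
instance (arr : List Int) (k : Int) (s : Int) (out : Int) : Decidable (Spec_count_subarray_sum arr k s out) := by unfold Spec_count_subarray_sum; infer_instance

-- ===== CLAIM (what is proved, stated in full; the proofs are below) =====
def Claim_equal_count_subarray_sum : Prop := ∀ (arr : List Int) (k : Int) (s : Int), Dom_count_subarray_sum arr k s → Spec_count_subarray_sum arr k s (count_subarray_sum arr k s)

-- ===== LEMMAS AND PROOFS =====

-- the prefix-sum loop builds exactly the list of partial sums
theorem pref_fold (l : List Int) (p0 : List Int) (r0 : Int) :
    l.foldl (fun (st : List Int × Int) x => (st.1 ++ [st.2 + x], st.2 + x)) (p0, r0)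
      = (p0 ++ (List.range l.length).map (fun t => r0 + (l.take (t + 1)).sum), r0 + l.sum) := by
  induction l generalizing p0 r0 with
  | nil => simp
  | cons x l ih =>
    rw [List.foldl_cons, ih]
    refine Prod.ext ?_ ?_
    · simp only [List.length_cons, List.range_succ_eq_map, List.map_cons, List.map_map]
      simp [List.append_assoc, Function.comp, add_assoc]
    · simp [add_assoc]

theorem pref_eq (arr : List Int) :
    (arr.foldl (fun (st : List Int × Int) x => (st.1 ++ [st.2 + x], st.2 + x)) ([0], 0)).1
      = (List.range (arr.length + 1)).map (fun t => (arr.take t).sum) := by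
  rw [pref_fold]
  simp [List.range_succ_eq_map, Function.comp]

theorem sum_take_drop (arr : List Int) (a b : Nat) (h : a ≤ b) :
    ((arr.drop a).take (b - a)).sum = (arr.take b).sum - (arr.take a).sum := by
  have hb : b = a + (b - a) := by omega
  have hsplit : arr.take b = arr.take a ++ (arr.drop a).take (b - a) := by
    conv_lhs => rw [hb]
    rw [List.take_add]
  rw [hsplit, List.sum_append]
  ring

theorem countP_range_guard (q : Nat → Bool) (K m : Nat) :
    (List.range K).countP (fun t => decide (t < m) && q t)
      = (List.range (min K m)).countP q := by
  induction K with
  | zero => simp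
  | succ K ih =>
    rw [List.range_succ, List.countP_append, ih]
    by_cases h : K < m
    · have hm : min (K + 1) m = min K m + 1 := by omega
      have hk : min K m = K := by omega
      rw [hm, List.range_succ, List.countP_append, hk]
      simp [h]
    · have hm : min (K + 1) m = min K m := by omega
      rw [hm]
      simp [h]

-- value of the prefix-sum list at an in-range index
theorem pref_getD (arr : List Int) (t : Nat) (ht : t ≤ arr.length) :
    PySem.List.pyGetD ((List.range (arr.length + 1)).map (fun u => (arr.take u).sum)) ((t : Nat) : Int) 0
      = (arr.take t).sum := by
  rw [PySem.List.pyGetD_natCast]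
  have h1 : t < arr.length + 1 := by omega
  simp [List.getD_eq_getElem?_getD, h1]

-- the two inner-loop counts agree for each start index i
theorem inner_eq (arr : List Int) (k s i : Int) (hi0 : 0 ≤ i) (hin : i < (arr.length : Int)) :
    ((PySem.List.pyRange 0 k 1).countP
        (fun j => decide (j + i < (arr.length : Int) ∧ (PySem.List.slice arr (some i) (some (i + j + 1))).sum = s)))
      = ((PySem.List.pyRange (i + 1) (min (arr.length : Int) (i + k) + 1) 1).countP
          (fun j => decide (PySem.List.pyGetD ((List.range (arr.length + 1)).map (fun u => (arr.take u).sum)) j 0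
              - PySem.List.pyGetD ((List.range (arr.length + 1)).map (fun u => (arr.take u).sum)) i 0 = s))) := by
  have hi : i = ((i.toNat : Nat) : Int) := by omega
  have hiNn : i.toNat < arr.length := by omega
  rw [PySem.List.pyRange_one 0 k, PySem.List.pyRange_one (i + 1) (min (arr.length : Int) (i + k) + 1)]
  rw [List.countP_map, List.countP_map]
  have hKm : (min ((arr.length : Int)) (i + k) + 1 - (i + 1)).toNat
      = min (k - 0).toNat (arr.length - i.toNat) := by omega
  rw [hKm, ← countP_range_guard]
  apply List.countP_congr
  intro t ht
  simp only [Function.comp]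
  by_cases hlt : t < arr.length - i.toNat
  · have hg : (t : Int) + i < (arr.length : Int) := by omega
    have hc1 : i + (t : Int) + 1 = (((i.toNat + t + 1 : Nat)) : Int) := by omega
    have hc2 : i + 1 + (t : Int) = (((i.toNat + 1 + t : Nat)) : Int) := by omega
    have hslice : (PySem.List.slice arr (some i) (some (i + (t : Int) + 1))).sum
        = (arr.take (i.toNat + t + 1)).sum - (arr.take i.toNat).sum := by
      rw [hc1]
      conv_lhs => rw [hi]
      rw [PySem.List.slice_natCast]
      simp only [Int.toNat_natCast]
      have htd := sum_take_drop arr i.toNat (i.toNat + t + 1) (by omega)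
      have htn : i.toNat + t + 1 - i.toNat = t + 1 := by omega
      rw [htn] at htd
      rw [htn]
      exact htd
    have hg1 : PySem.List.pyGetD ((List.range (arr.length + 1)).map (fun u => (arr.take u).sum)) (i + 1 + (t : Int)) 0
        = (arr.take (i.toNat + 1 + t)).sum := by
      rw [hc2]; exact pref_getD arr (i.toNat + 1 + t) (by omega)
    have hg2 : PySem.List.pyGetD ((List.range (arr.length + 1)).map (fun u => (arr.take u).sum)) i 0
        = (arr.take i.toNat).sum := by
      conv_lhs => rw [hi]
      exact pref_getD arr i.toNat (by omega)
    have hidx : i.toNat + 1 + t = i.toNat + t + 1 := by omega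
    simp only [zero_add, hslice, hg1, hg2, hidx]
    simp [hg, hlt]
  · have hg : ¬ ((t : Int) + i < (arr.length : Int)) := by omega
    simp [hg, hlt]

-- inner loop of A counts the qualifying end offsets
theorem A_inner (arr : List Int) (k s : Int) (a i : Int) :
    (PySem.List.pyRange 0 k 1).foldl (fun count j =>
        if j + i < (arr.length : Int) then
          if (PySem.List.slice arr (some i) (some (i + j + 1))).sum = s then count + 1 else count
        else count) a
      = a + ((PySem.List.pyRange 0 k 1).countP
          (fun j => decide (j + i < (arr.length : Int) ∧ (PySem.List.slice arr (some i) (some (i + j + 1))).sum = s)) : Int) := by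
  have hcong := PySem.List.foldl_congr_mem
      (l := PySem.List.pyRange 0 k 1) (init := a)
      (f := fun count j => if j + i < (arr.length : Int) then
          if (PySem.List.slice arr (some i) (some (i + j + 1))).sum = s then count + 1 else count
        else count)
      (g := fun count j => if (j + i < (arr.length : Int) ∧ (PySem.List.slice arr (some i) (some (i + j + 1))).sum = s)
        then count + 1 else count)
      (fun acc x _ => by
        by_cases h1 : x + i < (arr.length : Int) <;>
          by_cases h2 : (PySem.List.slice arr (some i) (some (i + x + 1))).sum = s <;> simp [h1, h2])
  rw [hcong]
  exact PySem.List.foldl_ite_add_one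
    (p := fun j => j + i < (arr.length : Int) ∧ (PySem.List.slice arr (some i) (some (i + j + 1))).sum = s) _ _

-- A as a sum of per-start counts
theorem A_eq (arr : List Int) (k s : Int) :
    count_subarray_sum arr k s
      = (((PySem.List.pyRange 0 (arr.length : Int) 1).map (fun i =>
          ((PySem.List.pyRange 0 k 1).countP
            (fun j => decide (j + i < (arr.length : Int) ∧ (PySem.List.slice arr (some i) (some (i + j + 1))).sum = s)) : Int))).sum) := by
  unfold count_subarray_sum
  have hcong := PySem.List.foldl_congr_mem
      (l := PySem.List.pyRange 0 (arr.length : Int) 1) (init := (0 : Int))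
      (f := fun count i => (PySem.List.pyRange 0 k 1).foldl (fun count j =>
        if j + i < (arr.length : Int) then
          if (PySem.List.slice arr (some i) (some (i + j + 1))).sum = s then count + 1 else count
        else count) count)
      (g := fun count i => count +
        ((PySem.List.pyRange 0 k 1).countP
            (fun j => decide (j + i < (arr.length : Int) ∧ (PySem.List.slice arr (some i) (some (i + j + 1))).sum = s)) : Int))
      (fun acc x _ => A_inner arr k s acc x)
  rw [hcong, PySem.List.foldl_add]
  simp

-- inner loop of B counts the qualifying end indices
theorem B_inner (arr : List Int) (k s : Int) (a i : Int) :
    (PySem.List.pyRange (i + 1) (min (arr.length : Int) (i + k) + 1) 1).foldl (fun count j =>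
        if PySem.List.pyGetD ((List.range (arr.length + 1)).map (fun u => (arr.take u).sum)) j 0
            - PySem.List.pyGetD ((List.range (arr.length + 1)).map (fun u => (arr.take u).sum)) i 0 = s
        then count + 1 else count) a
      = a + ((PySem.List.pyRange (i + 1) (min (arr.length : Int) (i + k) + 1) 1).countP
          (fun j => decide (PySem.List.pyGetD ((List.range (arr.length + 1)).map (fun u => (arr.take u).sum)) j 0
              - PySem.List.pyGetD ((List.range (arr.length + 1)).map (fun u => (arr.take u).sum)) i 0 = s)) : Int) := by
  exact PySem.List.foldl_ite_add_one
    (p := fun j => PySem.List.pyGetD ((List.range (arr.length + 1)).map (fun u => (arr.take u).sum)) j 0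
        - PySem.List.pyGetD ((List.range (arr.length + 1)).map (fun u => (arr.take u).sum)) i 0 = s) _ _

theorem B_eq (arr : List Int) (k s : Int) :
    count_subarray_sum_alt arr k s
      = (((PySem.List.pyRange 0 (arr.length : Int) 1).map (fun i =>
          ((PySem.List.pyRange (i + 1) (min (arr.length : Int) (i + k) + 1) 1).countP
            (fun j => decide (PySem.List.pyGetD ((List.range (arr.length + 1)).map (fun u => (arr.take u).sum)) j 0
              - PySem.List.pyGetD ((List.range (arr.length + 1)).map (fun u => (arr.take u).sum)) i 0 = s)) : Int))).sum) := by
  show (PySem.List.pyRange 0 (arr.length : Int) 1).foldl (fun count i =>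
      (PySem.List.pyRange (i + 1) (min (arr.length : Int) (i + k) + 1) 1).foldl (fun count j =>
        if PySem.List.pyGetD (arr.foldl (fun (st : List Int × Int) x => (st.1 ++ [st.2 + x], st.2 + x)) ([0], 0)).1 j 0
            - PySem.List.pyGetD (arr.foldl (fun (st : List Int × Int) x => (st.1 ++ [st.2 + x], st.2 + x)) ([0], 0)).1 i 0 = s
        then count + 1 else count) count) 0 = _
  simp only [pref_eq]
  have hcong := PySem.List.foldl_congr_mem
      (l := PySem.List.pyRange 0 (arr.length : Int) 1) (init := (0 : Int))
      (f := fun count i => (PySem.List.pyRange (i + 1) (min (arr.length : Int) (i + k) + 1) 1).foldl (fun count j =>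
        if PySem.List.pyGetD ((List.range (arr.length + 1)).map (fun u => (arr.take u).sum)) j 0
            - PySem.List.pyGetD ((List.range (arr.length + 1)).map (fun u => (arr.take u).sum)) i 0 = s
        then count + 1 else count) count)
      (g := fun count i => count +
        ((PySem.List.pyRange (i + 1) (min (arr.length : Int) (i + k) + 1) 1).countP
          (fun j => decide (PySem.List.pyGetD ((List.range (arr.length + 1)).map (fun u => (arr.take u).sum)) j 0
              - PySem.List.pyGetD ((List.range (arr.length + 1)).map (fun u => (arr.take u).sum)) i 0 = s)) : Int))
      (fun acc x _ => B_inner arr k s acc x)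
  rw [hcong, PySem.List.foldl_add]
  simp

-- ===== VERDICT (by name: the statement is the Claim_ definition above) =====
theorem count_subarray_sum_spec : Claim_equal_count_subarray_sum := by
  intro arr k s _
  unfold Spec_count_subarray_sum
  rw [A_eq, B_eq]
  refine congrArg List.sum (List.map_congr_left ?_)
  intro i hi
  have hmem := (PySem.List.mem_pyRange_one).mp hi
  exact_mod_cast inner_eq arr k s i hmem.1 hmem.2
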